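-- pv_equiv track=rewrite | github.com/edoardob90/aoc | 2019/4/4.py | part2
-- ===== SOURCE A (Python) =====
-- from collections import Counter
--
-- def part2(data):
--     """Solve part 2"""
--     count = 0
--     for pwd in data:
--         pwd = list(str(pwd))
--         if pwd == sorted(pwd):
--             c = Counter(pwd).values()
--             if list(c).count(2) >= 1:
--                 count += 1
--     return count
-- ===== SOURCE B (Python) =====
-- def _good(s):
--     ok = True
--     has_pair = False
--     run = 1
--     for i in range(1, len(s)):
--         prev, cur = s[i - 1], s[i]
--         if cur < prev:
--             ok = False
--         elif cur == prev:
--             run += 1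
--         else:
--             if run == 2:
--                 has_pair = True
--             run = 1
--     return ok and (has_pair or run == 2)
--
--
-- def part2(data):
--     """Solve part 2"""
--     return sum(1 for pwd in data if _good(str(pwd)))
-- ===== Notes on version B (the rewrite author's own statement) =====
-- stated objective: alternative
-- what changed: Per password, B replaces A's sorted() comparison plus Counter tally with one left-to-right scan of the digit string that tracks the previous character and the current run length, flagging a strict decrease (invalid) and a finished run of length exactly 2 (pair).
import Mathlib
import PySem

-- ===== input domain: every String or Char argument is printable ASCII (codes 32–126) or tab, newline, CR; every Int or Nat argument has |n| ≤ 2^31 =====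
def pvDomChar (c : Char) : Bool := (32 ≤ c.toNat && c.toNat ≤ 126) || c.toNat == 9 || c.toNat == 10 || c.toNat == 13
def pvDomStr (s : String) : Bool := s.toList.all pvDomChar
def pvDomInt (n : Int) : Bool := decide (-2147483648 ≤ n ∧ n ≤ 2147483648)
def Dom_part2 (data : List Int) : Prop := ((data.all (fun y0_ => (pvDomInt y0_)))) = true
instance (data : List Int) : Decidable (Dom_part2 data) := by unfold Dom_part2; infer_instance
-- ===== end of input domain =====

-- B replaces A's per-password sorted() comparison and Counter tally with one
-- left-to-right run-length scan of the digit string (objective: alternative algorithm).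

-- ===== PORT A =====
-- literal port of A: for each pwd, compare its char list with sorted(pwd); if equal,
-- count 2 among Counter(pwd).values() and require at least one.
def part2 (data : List Int) : Int :=
  data.foldl (fun count pwd0 =>
    let pwd := PySem.Int.toChars pwd0
    if pwd = PySem.List.sorted pwd (fun c => c) false then
      let c := (PySem.Dict.counter pwd).values
      if 1 ≤ PySem.List.count c (2 : Int) then count + 1 else count
    else count) 0

-- ===== PORT B =====
-- the scan of Source B's _good: prev carries s[i-1], run the current run length,
-- ok the monotonicity flag, hp whether a finished run had length exactly 2.
def part2Scan : List Char → Char → Int → Bool → Bool → Bool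
  | [], _, run, ok, hp => ok && (hp || run == 2)
  | cur :: rest, prev, run, ok, hp =>
    if cur < prev then part2Scan rest cur run false hp
    else if cur == prev then part2Scan rest cur (run + 1) ok hp
    else part2Scan rest cur 1 ok (hp || run == 2)

def part2Good (s : List Char) : Bool :=
  match s with
  | [] => false
  | c :: rest => part2Scan rest c 1 true false

def part2_alt (data : List Int) : Int :=
  ((data.countP (fun pwd => part2Good (PySem.Int.toChars pwd)) : Nat) : Int)

-- ===== PRECONDITION & SPEC =====
def Spec_part2 (data : List Int) (out : Int) : Prop := out = part2_alt data
instance (data : List Int) (out : Int) : Decidable (Spec_part2 data out) := by unfold Spec_part2; infer_instance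

-- ===== CLAIM (what is proved, stated in full; the proofs are below) =====
def Claim_equal_part2 : Prop := ∀ (data : List Int), Dom_part2 data → Spec_part2 data (part2 data)

-- ===== LEMMAS AND PROOFS =====

-- Boolean adjacency (chain) check: prev ≤ c along the list.
def chainB : Char → List Char → Bool
  | _, [] => true
  | prev, c :: t => decide (prev ≤ c) && chainB c t

-- run-length bookkeeping of the scan, with the ok/hp flags stripped away
def hasRun : Char → Int → List Char → Bool
  | _, run, [] => run == 2
  | prev, run, c :: t => if c == prev then hasRun c (run + 1) t else (run == 2) || hasRun c 1 t

lemma scan_eq : ∀ (l : List Char) (prev : Char) (run : Int) (ok hp : Bool),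
    part2Scan l prev run ok hp = (ok && chainB prev l && (hp || hasRun prev run l)) := by
  intro l
  induction l with
  | nil => intro prev run ok hp; simp [part2Scan, chainB, hasRun]
  | cons c t ih =>
    intro prev run ok hp
    by_cases h1 : c < prev
    · have hle : ¬ prev ≤ c := not_le.mpr h1
      simp [part2Scan, chainB, h1, hle, ih]
    · by_cases h2 : c = prev
      · subst h2
        simp [part2Scan, chainB, hasRun, ih]
      · have hlt : prev < c := lt_of_le_of_ne (not_lt.mp h1) (Ne.symm h2)
        have hle : prev ≤ c := le_of_lt hlt
        simp [part2Scan, chainB, hasRun, h1, h2, hle, ih, Bool.or_assoc]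

lemma chainB_iff : ∀ (prev : Char) (l : List Char),
    chainB prev l = true ↔ List.IsChain (· ≤ ·) (prev :: l) := by
  intro prev l
  induction l generalizing prev with
  | nil => simp [chainB]
  | cons c t ih => simp [chainB, List.isChain_cons_cons, ih]

lemma chain_le_of_mem {c : Char} {t : List Char} (h : List.IsChain (· ≤ ·) (c :: t))
    {d : Char} (hd : d ∈ t) : c ≤ d := by
  have hp := List.IsChain.pairwise h
  exact (List.pairwise_cons.mp hp).1 d hd

lemma count_cons_ne (c d : Char) (t : List Char) (h : d ≠ c) :
    (c :: t).count d = t.count d := by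
  simp [Ne.symm h]

lemma count_cons_self (c : Char) (t : List Char) : (c :: t).count c = t.count c + 1 := by
  simp

lemma hasRun_iff : ∀ (l : List Char) (prev : Char) (run : Int),
    List.IsChain (· ≤ ·) (prev :: l) →
    (hasRun prev run l = true ↔
      run + (l.count prev : Int) = 2 ∨ ∃ c ∈ l, c ≠ prev ∧ l.count c = 2) := by
  intro l
  induction l with
  | nil => intro prev run _; simp [hasRun]
  | cons c t ih =>
    intro prev run hch
    have hch' : List.IsChain (· ≤ ·) (c :: t) := hch.tail
    by_cases h2 : c = prev
    · subst h2
      rw [hasRun, if_pos (by simp), ih c (run + 1) hch', count_cons_self]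
      constructor
      · rintro (h | ⟨d, hd, hne, hcnt⟩)
        · left; push_cast at h ⊢; omega
        · right
          exact ⟨d, List.mem_cons_of_mem _ hd, hne, by rw [count_cons_ne c d t hne]; exact hcnt⟩
      · rintro (h | ⟨d, hd, hne, hcnt⟩)
        · left; push_cast at h ⊢; omega
        · rcases List.mem_cons.mp hd with h' | h'
          · exact absurd h' hne
          · right; exact ⟨d, h', hne, by rw [count_cons_ne c d t hne] at hcnt; exact hcnt⟩
    · have hlt : prev < c := lt_of_le_of_ne (by
        rcases hch with _ | _ | ⟨hle, _⟩
        · exact hle) (Ne.symm h2)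
      have hnm : prev ∉ c :: t := by
        intro hmem
        rcases List.mem_cons.mp hmem with h' | h'
        · exact h2 h'.symm
        · exact absurd (chain_le_of_mem hch' h') (not_le.mpr hlt)
      have hcnt0 : (c :: t).count prev = 0 := List.count_eq_zero.mpr hnm
      rw [hasRun, if_neg (by simp [h2]), Bool.or_eq_true, ih c 1 hch', hcnt0]
      constructor
      · rintro (h | h | ⟨d, hd, hne, hcnt⟩)
        · left; have : run = 2 := by exact_mod_cast beq_iff_eq.mp h
          simp [this]
        · right
          refine ⟨c, List.mem_cons_self, h2, ?_⟩
          rw [count_cons_self]; omega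
        · right
          have hdp : d ≠ prev := by
            intro he; subst he
            exact absurd (chain_le_of_mem hch' hd) (not_le.mpr hlt)
          refine ⟨d, List.mem_cons_of_mem _ hd, hdp, ?_⟩
          rw [count_cons_ne c d t hne]; exact hcnt
      · rintro (h | ⟨d, hd, hdp, hcnt⟩)
        · left
          have : run = 2 := by push_cast at h; omega
          exact beq_iff_eq.mpr (by exact_mod_cast this)
        · rcases List.mem_cons.mp hd with h' | h'
          · subst h'
            right; left
            rw [count_cons_self] at hcnt; omega
          · by_cases hdc : d = c
            · subst hdc
              right; left
              rw [count_cons_self] at hcnt; omega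
            · right; right
              refine ⟨d, h', hdc, ?_⟩
              rw [count_cons_ne c d t hdc] at hcnt; exact hcnt

lemma values_counter (s : List Char) :
    (PySem.Dict.counter s).values = (PySem.Set.ofList s).map (fun k => ((s.count k : Nat) : Int)) := by
  have h := PySem.Dict.items_counter s
  calc (PySem.Dict.counter s).values
      = (PySem.Dict.counter s).items.map (·.2) := rfl
    _ = _ := by rw [h, List.map_map]; rfl

lemma countA_iff (s : List Char) :
    1 ≤ PySem.List.count ((PySem.Dict.counter s).values) (2 : Int) ↔ ∃ c ∈ s, s.count c = 2 := by
  rw [PySem.List.count_eq, values_counter]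
  rw [Nat.one_le_iff_ne_zero, Ne, List.count_eq_zero, not_not]
  simp only [List.mem_map, PySem.Set.mem_ofList]
  constructor
  · rintro ⟨c, hc, hv⟩
    exact ⟨c, hc, by exact_mod_cast hv⟩
  · rintro ⟨c, hc, hv⟩
    exact ⟨c, hc, by exact_mod_cast hv⟩

lemma count_cons_self_iff (c : Char) (rest : List Char) :
    (∃ d ∈ c :: rest, (c :: rest).count d = 2) ↔
    (1 + (rest.count c : Int) = 2 ∨ ∃ d ∈ rest, d ≠ c ∧ rest.count d = 2) := by
  constructor
  · rintro ⟨d, hd, hcnt⟩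
    rcases List.mem_cons.mp hd with h' | h'
    · subst h'; left; rw [count_cons_self] at hcnt; omega
    · by_cases hdc : d = c
      · subst hdc; left; rw [count_cons_self] at hcnt; omega
      · right; refine ⟨d, h', hdc, ?_⟩; rw [count_cons_ne c d rest hdc] at hcnt; exact hcnt
  · rintro (h | ⟨d, hd, hdc, hcnt⟩)
    · refine ⟨c, List.mem_cons_self, ?_⟩; rw [count_cons_self]; omega
    · refine ⟨d, List.mem_cons_of_mem _ hd, ?_⟩
      rw [count_cons_ne c d rest hdc]; exact hcnt

lemma good_iff (s : List Char) :
    part2Good s = true ↔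
      (s = PySem.List.sorted s (fun c => c) false ∧
        1 ≤ PySem.List.count ((PySem.Dict.counter s).values) (2 : Int)) := by
  cases s with
  | nil => simp [part2Good]; decide
  | cons c rest =>
    rw [part2Good, scan_eq]
    simp only [Bool.true_and, Bool.false_or, Bool.and_eq_true]
    rw [countA_iff, chainB_iff]
    constructor
    · rintro ⟨hch, hrun⟩
      have hpw : List.Pairwise (fun a b => a ≤ b) (c :: rest) := List.IsChain.pairwise hch
      refine ⟨(PySem.List.sorted_eq_self_of_pairwise _ _ hpw).symm, ?_⟩
      rw [count_cons_self_iff]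
      exact (hasRun_iff rest c 1 hch).mp hrun
    · rintro ⟨hs, hex⟩
      have hpw : List.Pairwise (fun a b => a ≤ b) (c :: rest) := by
        rw [hs]; exact PySem.List.sorted_pairwise _ _
      have hch : List.IsChain (· ≤ ·) (c :: rest) := hpw.isChain
      refine ⟨hch, (hasRun_iff rest c 1 hch).mpr ?_⟩
      rw [← count_cons_self_iff]
      exact hex

-- ===== VERDICT (by name: the statement is the Claim_ definition above) =====
theorem part2_spec : Claim_equal_part2 := by
  intro data _
  unfold Spec_part2 part2 part2_alt
  have hbody : ∀ (count : Int) (pwd0 : Int),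
      (let pwd := PySem.Int.toChars pwd0
       if pwd = PySem.List.sorted pwd (fun c => c) false then
         let c := (PySem.Dict.counter pwd).values
         if 1 ≤ PySem.List.count c (2 : Int) then count + 1 else count
       else count)
      = (if part2Good (PySem.Int.toChars pwd0) = true then count + 1 else count) := by
    intro count pwd0
    simp only []
    by_cases hg : part2Good (PySem.Int.toChars pwd0) = true
    · obtain ⟨h1, h2⟩ := (good_iff _).mp hg
      rw [if_pos h1, if_pos h2, if_pos hg]
    · rw [if_neg hg]
      by_cases h1 : PySem.Int.toChars pwd0 =
          PySem.List.sorted (PySem.Int.toChars pwd0) (fun c => c) false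
      · rw [if_pos h1]
        rw [if_neg (fun h2 => hg ((good_iff _).mpr ⟨h1, h2⟩))]
      · rw [if_neg h1]
  calc data.foldl _ 0
      = data.foldl (fun count pwd0 => if part2Good (PySem.Int.toChars pwd0) = true then count + 1 else count) 0 :=
        PySem.List.foldl_congr_mem data _ _ 0 (fun acc x _ => hbody acc x)
  _ = 0 + ((data.countP (fun pwd => part2Good (PySem.Int.toChars pwd)) : Nat) : Int) :=
        PySem.List.foldl_count_if _ data 0
  _ = _ := by rw [zero_add]
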